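-- pv_equiv track=rewrite | github.com/boatsy23/AflFantasyManager-Rohan | scrape_all_dfs_players.py | determine_position
-- ===== SOURCE A (Python) =====
-- def determine_position(info, raw_data):
--     """Determine player position from various data sources"""
--     # Check direct position field
--     if info.get('position'):
--         return info.get('position')
--
--     # Check starting position from games
--     if raw_data.get('combinedGames'):
--         for game in raw_data['combinedGames'][:5]:
--             if game.get('startingPosition'):
--                 pos = game.get('startingPosition')
--                 if 'MID' in pos or 'CEN' in pos:
--                     return 'MID'
--                 elif 'FWD' in pos or 'FF' in pos:
--                     return 'FWD'
--                 elif 'DEF' in pos or 'BP' in pos or 'FB' in pos: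
--                     return 'DEF'
--                 elif 'RUC' in pos:
--                     return 'RUC'
--
--     return 'MID'  # Default
-- ===== SOURCE B (Python) =====
-- _KEYWORDS = [
--     ("MID", 0, "MID"), ("CEN", 0, "MID"),
--     ("FWD", 1, "FWD"), ("FF", 1, "FWD"),
--     ("DEF", 2, "DEF"), ("BP", 2, "DEF"), ("FB", 2, "DEF"),
--     ("RUC", 3, "RUC"),
-- ]
--
--
-- def determine_position(info, raw_data):
--     """Determine player position: collect every (game index, rule priority, result)
--     keyword hit in one comprehension, then take the lexicographic minimum."""
--     if info.get('position'):
--         return info.get('position')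
--     games = raw_data.get('combinedGames') or []
--     candidates = [
--         (i, pri, res)
--         for i, game in enumerate(games[:5])
--         if game.get('startingPosition')
--         for kw, pri, res in _KEYWORDS
--         if kw in game['startingPosition']
--     ]
--     if not candidates:
--         return 'MID'
--     return min(candidates, key=lambda c: (c[0], c[1]))[2]
-- ===== Notes on version B (the rewrite author's own statement) =====
-- stated objective: alternative
-- what changed: A's nested early-return scan (per game, an if/elif keyword chain) is replaced by a collect-then-select algorithm: one comprehension gathers every (game index, rule priority, result) keyword hit over the first 5 games, and the answer is the lexicographic minimum of that candidate list (default 'MID').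
import Mathlib
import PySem

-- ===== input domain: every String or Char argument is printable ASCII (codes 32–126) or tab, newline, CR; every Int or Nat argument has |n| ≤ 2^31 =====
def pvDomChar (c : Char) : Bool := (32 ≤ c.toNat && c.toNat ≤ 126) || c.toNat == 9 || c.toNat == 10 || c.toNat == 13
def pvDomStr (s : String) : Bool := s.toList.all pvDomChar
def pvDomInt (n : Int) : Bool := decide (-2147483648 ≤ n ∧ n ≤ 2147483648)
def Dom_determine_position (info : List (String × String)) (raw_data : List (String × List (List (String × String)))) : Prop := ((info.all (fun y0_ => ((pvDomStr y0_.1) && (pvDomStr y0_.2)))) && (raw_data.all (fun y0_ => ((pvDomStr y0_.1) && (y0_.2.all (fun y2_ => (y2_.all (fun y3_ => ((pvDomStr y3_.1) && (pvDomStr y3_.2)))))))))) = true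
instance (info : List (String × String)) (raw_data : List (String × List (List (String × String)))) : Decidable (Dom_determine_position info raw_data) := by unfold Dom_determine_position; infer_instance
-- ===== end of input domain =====

-- B replaces A's nested early-return scan by collect-all-keyword-hits-then-take-the-
-- lexicographic-minimum (objective: alternative, same cost).

-- ===== PORT A =====
-- the 'for game in raw_data['combinedGames'][:5]' loop with its inline if/elif chain
def dpLoopA : List (List (String × String)) → String
  | [] => "MID"
  | g :: rest =>
    match (PySem.Dict.mk g).get? "startingPosition" with
    | some pos =>
      if pos ≠ "" then
        if PySem.Str.isIn "MID" pos || PySem.Str.isIn "CEN" pos then "MID"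
        else if PySem.Str.isIn "FWD" pos || PySem.Str.isIn "FF" pos then "FWD"
        else if PySem.Str.isIn "DEF" pos || PySem.Str.isIn "BP" pos || PySem.Str.isIn "FB" pos then "DEF"
        else if PySem.Str.isIn "RUC" pos then "RUC"
        else dpLoopA rest
      else dpLoopA rest
    | none => dpLoopA rest

-- "if raw_data.get('combinedGames'): for game in raw_data['combinedGames'][:5]: … return 'MID'"
def dpBodyA (raw_data : List (String × List (List (String × String)))) : String :=
  match (PySem.Dict.mk raw_data).get? "combinedGames" with
  | some games => if games ≠ [] then dpLoopA (PySem.List.slice games none (some 5)) else "MID"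
  | none => "MID"

def determine_position (info : List (String × String)) (raw_data : List (String × List (List (String × String)))) : String :=
  match (PySem.Dict.mk info).get? "position" with
  | some p => if p ≠ "" then p else dpBodyA raw_data
  | none => dpBodyA raw_data

-- ===== PORT B =====
-- the module constant _KEYWORDS: (keyword, rule priority, result)
def dpKeywords : List (String × Int × String) :=
  [("MID", 0, "MID"), ("CEN", 0, "MID"),
   ("FWD", 1, "FWD"), ("FF", 1, "FWD"),
   ("DEF", 2, "DEF"), ("BP", 2, "DEF"), ("FB", 2, "DEF"),
   ("RUC", 3, "RUC")]

-- the candidate comprehension: every keyword hit as (game index, priority, result)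
def dpCandidates (games : List (List (String × String))) : List (Int × Int × String) :=
  (PySem.List.enumerate games).flatMap (fun p =>
    let sp := ((PySem.Dict.mk p.2).get? "startingPosition").getD ""
    if sp ≠ "" then
      dpKeywords.filterMap (fun t =>
        if PySem.Str.isIn t.1 sp then some (p.1, t.2.1, t.2.2) else none)
    else [])

def determine_position_alt (info : List (String × String)) (raw_data : List (String × List (List (String × String)))) : String :=
  let direct := ((PySem.Dict.mk info).get? "position").getD ""
  if direct ≠ "" then direct
  else
    let games := ((PySem.Dict.mk raw_data).get? "combinedGames").getD []
    let candidates := dpCandidates (PySem.List.slice games none (some 5))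
    if candidates = [] then "MID"
    else
      match PySem.List.min2? candidates (fun c => c.1) (fun c => c.2.1) with
      | some c => c.2.2
      | none => "MID"

-- ===== PRECONDITION & SPEC =====
def Spec_determine_position (info : List (String × String)) (raw_data : List (String × List (List (String × String)))) (out : String) : Prop := out = determine_position_alt info raw_data
instance (info : List (String × String)) (raw_data : List (String × List (List (String × String)))) (out : String) : Decidable (Spec_determine_position info raw_data out) := by unfold Spec_determine_position; infer_instance

-- ===== CLAIM =====
def Claim_equal_determine_position : Prop := ∀ (info : List (String × String)) (raw_data : List (String × List (List (String × String)))), Dom_determine_position info raw_data → Spec_determine_position info raw_data (determine_position info raw_data)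

-- ===== LEMMAS AND PROOFS =====

-- the candidates contributed by one game at index s
def dpGameCands (s : Int) (g : List (String × String)) : List (Int × Int × String) :=
  if ((PySem.Dict.mk g).get? "startingPosition").getD "" ≠ "" then
    dpKeywords.filterMap (fun t =>
      if PySem.Str.isIn t.1 (((PySem.Dict.mk g).get? "startingPosition").getD "") then
        some (s, t.2.1, t.2.2) else none)
  else []

-- candidates from index s, structurally
def dpCandsFrom (s : Int) : List (List (String × String)) → List (Int × Int × String)
  | [] => []
  | g :: rest => dpGameCands s g ++ dpCandsFrom (s + 1) rest

theorem dpCandidates_eq_from (games : List (List (String × String))) :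
    dpCandidates games = dpCandsFrom 0 games := by
  suffices h : ∀ (l : List (List (String × String))) (s : Int),
      (PySem.List.enumerate l s).flatMap (fun p =>
        let sp := ((PySem.Dict.mk p.2).get? "startingPosition").getD ""
        if sp ≠ "" then
          dpKeywords.filterMap (fun t =>
            if PySem.Str.isIn t.1 sp then some (p.1, t.2.1, t.2.2) else none)
        else []) = dpCandsFrom s l by
    exact h games 0
  intro l
  induction l with
  | nil => intro s; rfl
  | cons g rest ih =>
    intro s
    simp only [PySem.List.enumerate_cons, List.flatMap_cons, ih, dpCandsFrom, dpGameCands]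

-- the beta-reduced step of min2? with our two keys
def dpStep (acc : Option (Int × Int × String)) (x : Int × Int × String) :
    Option (Int × Int × String) :=
  match acc with
  | none => some x
  | some m =>
    if (decide (x.1 < m.1) || !decide (m.1 < x.1) && decide (x.2.1 < m.2.1)) = true
    then some x else some m

theorem dpMin2_eq_fold (cs : List (Int × Int × String)) :
    PySem.List.min2? cs (fun c => c.1) (fun c => c.2.1) = cs.foldl dpStep none := by
  unfold PySem.List.min2?
  congr 1
  funext acc x
  cases acc <;> rfl

-- the decoded result of the candidate list
def dpPick (cs : List (Int × Int × String)) : String :=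
  match PySem.List.min2? cs (fun c => c.1) (fun c => c.2.1) with
  | some c => c.2.2
  | none => "MID"

-- every candidate from a single game carries that game's index
theorem dpGameCands_fst {s : Int} {g : List (String × String)} {c : Int × Int × String}
    (h : c ∈ dpGameCands s g) : c.1 = s := by
  unfold dpGameCands at h
  split at h
  · rcases List.mem_filterMap.mp h with ⟨t, _, ht⟩
    split at ht
    · cases ht; rfl
    · cases ht
  · cases h

-- every candidate from later games carries a strictly larger index
theorem dpCandsFrom_fst {s t : Int} (hst : t < s) :
    ∀ (l : List (List (String × String))) (c : Int × Int × String),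
      c ∈ dpCandsFrom s l → t < c.1 := by
  intro l
  induction l generalizing s hst with
  | nil => intro c h; cases h
  | cons g rest ih =>
    intro c h
    rcases List.mem_append.mp h with h | h
    · rw [dpGameCands_fst h]; exact hst
    · exact ih (by omega) c h

-- the fold starting from some m stays in {some m} ∪ elements seen
theorem dpFold_some (a : List (Int × Int × String)) :
    ∀ (m : Int × Int × String), a.foldl dpStep (some m) = some m ∨
      ∃ c ∈ a, a.foldl dpStep (some m) = some c := by
  induction a with
  | nil => intro m; exact Or.inl rfl
  | cons x a ih =>
    intro m
    simp only [List.foldl_cons, dpStep]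
    split
    · rcases ih x with h | ⟨c, hc, h⟩
      · exact Or.inr ⟨x, List.mem_cons_self .., h⟩
      · exact Or.inr ⟨c, List.mem_cons_of_mem _ hc, h⟩
    · rcases ih m with h | ⟨c, hc, h⟩
      · exact Or.inl h
      · exact Or.inr ⟨c, List.mem_cons_of_mem _ hc, h⟩

theorem dpFold_none_mem {a : List (Int × Int × String)} {m : Int × Int × String}
    (h : a.foldl dpStep none = some m) : m ∈ a := by
  cases a with
  | nil => cases h
  | cons x a =>
    simp only [List.foldl_cons, dpStep] at h
    rcases dpFold_some a x with h' | ⟨c, hc, h'⟩ <;> rw [h'] at h <;> cases h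
    · exact List.mem_cons_self ..
    · exact List.mem_cons_of_mem _ hc

theorem dpFold_none_eq_none {a : List (Int × Int × String)}
    (h : a.foldl dpStep none = none) : a = [] := by
  cases a with
  | nil => rfl
  | cons x a =>
    exfalso
    simp only [List.foldl_cons, dpStep] at h
    rcases dpFold_some a x with h' | ⟨c, _, h'⟩ <;> rw [h'] at h <;> cases h

-- the fold never replaces the accumulator by a later-index element
theorem dpFold_keep (m : Int × Int × String) (b : List (Int × Int × String))
    (hb : ∀ c ∈ b, m.1 < c.1) : b.foldl dpStep (some m) = some m := by
  induction b with
  | nil => rfl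
  | cons c b ih =>
    have h1 := hb c (List.mem_cons_self ..)
    simp only [List.foldl_cons, dpStep]
    have : (decide (c.1 < m.1) || !decide (m.1 < c.1) && decide (c.2.1 < m.2.1)) = false := by
      simp only [Bool.or_eq_false_iff, Bool.and_eq_false_iff, decide_eq_false_iff_not, not_lt,
        Bool.not_eq_false', decide_eq_true_eq]
      exact ⟨by omega, Or.inl h1⟩
    rw [this]
    exact ih (fun c hc => hb c (List.mem_cons_of_mem _ hc))

-- min2? of an append whose first part has strictly smaller first keys
theorem dpMin2_append (a b : List (Int × Int × String)) (ha : a ≠ [])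
    (hab : ∀ x ∈ a, ∀ y ∈ b, x.1 < y.1) :
    PySem.List.min2? (a ++ b) (fun c => c.1) (fun c => c.2.1)
      = PySem.List.min2? a (fun c => c.1) (fun c => c.2.1) := by
  rw [dpMin2_eq_fold, dpMin2_eq_fold, List.foldl_append]
  rcases hm : a.foldl dpStep none with _ | m
  · exact absurd (dpFold_none_eq_none hm) ha
  · exact dpFold_keep m b (fun c hc => hab m (dpFold_none_mem hm) c hc)

-- one game step of A's loop, with abstract continuation k, equals the decoded
-- minimum of that game's candidates (k when the game contributes none)
set_option maxHeartbeats 1600000 in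
theorem dpStep_game (s : Int) (g : List (String × String)) (k : String) :
    (match (PySem.Dict.mk g).get? "startingPosition" with
     | some pos =>
       if pos ≠ "" then
         if PySem.Str.isIn "MID" pos || PySem.Str.isIn "CEN" pos then "MID"
         else if PySem.Str.isIn "FWD" pos || PySem.Str.isIn "FF" pos then "FWD"
         else if PySem.Str.isIn "DEF" pos || PySem.Str.isIn "BP" pos || PySem.Str.isIn "FB" pos then "DEF"
         else if PySem.Str.isIn "RUC" pos then "RUC"
         else k
       else k
     | none => k)
    = if dpGameCands s g = [] then k else dpPick (dpGameCands s g) := by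
  unfold dpGameCands
  cases h : (PySem.Dict.mk g).get? "startingPosition" with
  | none => simp
  | some pos =>
    by_cases hp : pos = ""
    · simp [hp]
    · simp only [Option.getD_some, hp, ne_eq, not_false_eq_true, if_true]
      cases h1 : PySem.Str.isIn "MID" pos <;>
      cases h2 : PySem.Str.isIn "CEN" pos <;>
      cases h3 : PySem.Str.isIn "FWD" pos <;>
      cases h4 : PySem.Str.isIn "FF" pos <;>
      cases h5 : PySem.Str.isIn "DEF" pos <;>
      cases h6 : PySem.Str.isIn "BP" pos <;>
      cases h7 : PySem.Str.isIn "FB" pos <;>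
      cases h8 : PySem.Str.isIn "RUC" pos <;>
        simp_all [dpKeywords, dpPick, dpMin2_eq_fold, dpStep, List.filterMap]

-- the loops coincide
theorem dpLoopA_eq (l : List (List (String × String))) (s : Int) :
    dpLoopA l = dpPick (dpCandsFrom s l) := by
  induction l generalizing s with
  | nil => rfl
  | cons g rest ih =>
    conv_lhs => rw [dpLoopA]
    rw [dpStep_game s g (dpLoopA rest)]
    by_cases hg : dpGameCands s g = []
    · rw [if_pos hg, ih (s + 1)]
      have hcf : dpCandsFrom s (g :: rest) = dpCandsFrom (s + 1) rest := by
        rw [dpCandsFrom, hg, List.nil_append]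
      rw [hcf]
    · rw [if_neg hg]
      have hmin : dpPick (dpCandsFrom s (g :: rest)) = dpPick (dpGameCands s g) := by
        unfold dpPick
        rw [dpCandsFrom, dpMin2_append _ _ hg]
        intro x hx y hy
        rw [dpGameCands_fst hx]
        exact dpCandsFrom_fst (by omega) rest y hy
      rw [hmin]

theorem determine_position_spec : Claim_equal_determine_position := by
  intro info raw_data _
  unfold Spec_determine_position determine_position determine_position_alt dpBodyA
  have hbody : ∀ (rd : List (String × List (List (String × String)))),
      (match (PySem.Dict.mk rd).get? "combinedGames" with
       | some games => if games ≠ [] then dpLoopA (PySem.List.slice games none (some 5)) else "MID"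
       | none => "MID")
      = (let games := ((PySem.Dict.mk rd).get? "combinedGames").getD []
         let candidates := dpCandidates (PySem.List.slice games none (some 5))
         if candidates = [] then "MID"
         else
           match PySem.List.min2? candidates (fun c => c.1) (fun c => c.2.1) with
           | some c => c.2.2
           | none => "MID") := by
    intro rd
    cases hg : (PySem.Dict.mk rd).get? "combinedGames" with
    | none => simp [PySem.List.slice, dpCandidates]
    | some games =>
      by_cases hgg : games = []
      · simp [hgg, PySem.List.slice, dpCandidates]
      · simp only [Option.getD_some, hgg, ne_eq, not_false_eq_true, if_true]
        rw [dpLoopA_eq _ 0, dpCandidates_eq_from]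
        by_cases hc : dpCandsFrom 0 (PySem.List.slice games none (some 5)) = []
        · simp [hc, dpPick, dpMin2_eq_fold]
        · rw [if_neg hc]
          unfold dpPick
          rfl
  cases hp : (PySem.Dict.mk info).get? "position" with
  | some p =>
    by_cases h : p = ""
    · simp only [h, Option.getD_some, ne_eq, not_true_eq_false, if_false]
      exact hbody raw_data
    · simp [h]
  | none =>
    simp only [Option.getD_none, ne_eq, not_true_eq_false, if_false]
    exact hbody raw_data
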